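-- pv_equiv track=rewrite | github.com/marketedgeglobal/VZLAnews | scripts/collect_rfps.py | _source_quality_tier
-- ===== SOURCE A (Python) =====
-- def _source_quality_tier(domain: str) -> str:
--     host = (domain or "").lower().strip()
--     if not host:
--         return "Unknown"
--
--     wire = ("reuters.com", "apnews.com", "bloomberg.com", "ft.com", "wsj.com")
--     ngo_multilateral = ("paho.org", "who.int", "reliefweb.int", "worldbank.org", "nrc.no")
--     major_media = ("bbc.com", "cnn.com", "nytimes.com", "wsj.com", "ft.com", "nbcnews.com")
--     local_regional = ("elpitazo.net", "efectococuyo.com", "el-nacional.com", "talcualdigital.com", "venezuelanalysis.com")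
--
--     if any(host == d or host.endswith(f".{d}") for d in wire):
--         return "Tier 1"
--     if any(host == d or host.endswith(f".{d}") for d in ngo_multilateral):
--         return "Tier 1"
--     if any(host == d or host.endswith(f".{d}") for d in major_media):
--         return "Tier 1"
--     if any(host == d or host.endswith(f".{d}") for d in local_regional):
--         return "Tier 2"
--     return "Tier 3"
-- ===== SOURCE B (Python) =====
-- _TIERS = {
--     "reuters.com": "Tier 1", "apnews.com": "Tier 1", "bloomberg.com": "Tier 1",
--     "ft.com": "Tier 1", "wsj.com": "Tier 1",
--     "paho.org": "Tier 1", "who.int": "Tier 1", "reliefweb.int": "Tier 1",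
--     "worldbank.org": "Tier 1", "nrc.no": "Tier 1",
--     "bbc.com": "Tier 1", "cnn.com": "Tier 1", "nytimes.com": "Tier 1",
--     "nbcnews.com": "Tier 1",
--     "elpitazo.net": "Tier 2", "efectococuyo.com": "Tier 2",
--     "el-nacional.com": "Tier 2", "talcualdigital.com": "Tier 2",
--     "venezuelanalysis.com": "Tier 2",
-- }
--
-- def _source_quality_tier(domain: str) -> str:
--     host = (domain or "").lower().strip()
--     if not host:
--         return "Unknown"
--     suffix = host
--     while True:
--         tier = _TIERS.get(suffix)
--         if tier is not None:
--             return tier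
--         _, sep, rest = suffix.partition(".")
--         if not sep:
--             return "Tier 3"
--         suffix = rest
-- ===== Notes on version B (the rewrite author's own statement) =====
-- stated objective: idiomatic
-- what changed: Replaces the four endswith scans over hard-coded domain tuples by a single domain-to-tier dict and a loop that walks the host's own dot-boundary suffixes (dropping the leftmost label each step) and returns the first table hit.
import Mathlib
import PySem

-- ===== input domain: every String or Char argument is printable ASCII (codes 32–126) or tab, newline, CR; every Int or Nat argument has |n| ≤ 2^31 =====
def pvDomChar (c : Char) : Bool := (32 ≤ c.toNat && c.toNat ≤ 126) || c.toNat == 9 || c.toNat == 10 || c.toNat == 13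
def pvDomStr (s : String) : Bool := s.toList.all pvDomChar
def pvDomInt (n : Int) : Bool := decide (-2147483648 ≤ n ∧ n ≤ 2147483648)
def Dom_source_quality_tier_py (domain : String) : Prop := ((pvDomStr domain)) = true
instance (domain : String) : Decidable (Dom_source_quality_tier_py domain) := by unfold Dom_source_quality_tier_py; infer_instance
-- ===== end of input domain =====

-- B replaces the four endswith scans over domain tuples by one domain→tier table and a walk over the
-- host's own dot-boundary suffixes (idiomatic; same observable behaviour, return value only).

-- ===== PORT A =====
def source_quality_tier_py (domain : String) : String :=
  let host := PySem.Str.strip (PySem.Str.lower domain)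
  if host == "" then "Unknown"
  else
    let wire : List String := ["reuters.com", "apnews.com", "bloomberg.com", "ft.com", "wsj.com"]
    let ngo_multilateral : List String := ["paho.org", "who.int", "reliefweb.int", "worldbank.org", "nrc.no"]
    let major_media : List String := ["bbc.com", "cnn.com", "nytimes.com", "wsj.com", "ft.com", "nbcnews.com"]
    let local_regional : List String := ["elpitazo.net", "efectococuyo.com", "el-nacional.com", "talcualdigital.com", "venezuelanalysis.com"]
    if wire.any (fun d => host == d || PySem.Str.endswith host ("." ++ d)) then "Tier 1"
    else if ngo_multilateral.any (fun d => host == d || PySem.Str.endswith host ("." ++ d)) then "Tier 1"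
    else if major_media.any (fun d => host == d || PySem.Str.endswith host ("." ++ d)) then "Tier 1"
    else if local_regional.any (fun d => host == d || PySem.Str.endswith host ("." ++ d)) then "Tier 2"
    else "Tier 3"

-- ===== PORT B =====
-- Source B's module-level dict _TIERS; keys kept as code-point lists (exact: string equality is code-point equality)
def altTable : PySem.Dict (List Char) String := PySem.Dict.mk
  [ ("reuters.com".toList, "Tier 1"), ("apnews.com".toList, "Tier 1"), ("bloomberg.com".toList, "Tier 1"),
    ("ft.com".toList, "Tier 1"), ("wsj.com".toList, "Tier 1"),
    ("paho.org".toList, "Tier 1"), ("who.int".toList, "Tier 1"), ("reliefweb.int".toList, "Tier 1"),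
    ("worldbank.org".toList, "Tier 1"), ("nrc.no".toList, "Tier 1"),
    ("bbc.com".toList, "Tier 1"), ("cnn.com".toList, "Tier 1"), ("nytimes.com".toList, "Tier 1"),
    ("nbcnews.com".toList, "Tier 1"),
    ("elpitazo.net".toList, "Tier 2"), ("efectococuyo.com".toList, "Tier 2"),
    ("el-nacional.com".toList, "Tier 2"), ("talcualdigital.com".toList, "Tier 2"),
    ("venezuelanalysis.com".toList, "Tier 2") ]

-- Source B's while-loop: look the current suffix up, else drop through the first '.' (suffix.partition("."))
def altLoop (s : List Char) : String :=
  match altTable.get? s with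
  | some t => t
  | none =>
    let rest := s.dropWhile (fun c => c ≠ '.')
    if hr : rest = [] then "Tier 3"
    else altLoop rest.tail
termination_by s.length
decreasing_by
  have h1 : (s.dropWhile (fun c => c ≠ '.')).length ≤ s.length := List.length_dropWhile_le _ _
  have h2 : (s.dropWhile (fun c => c ≠ '.')).length ≠ 0 := fun h => hr (List.length_eq_zero_iff.mp h)
  rw [List.length_tail]
  omega

def source_quality_tier_py_alt (domain : String) : String :=
  let host := PySem.Str.strip (PySem.Str.lower domain)
  if host == "" then "Unknown"
  else altLoop host.toList

-- ===== PRECONDITION & SPEC =====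
def Spec_source_quality_tier_py (domain : String) (out : String) : Prop := out = source_quality_tier_py_alt domain
instance (domain : String) (out : String) : Decidable (Spec_source_quality_tier_py domain out) := by unfold Spec_source_quality_tier_py; infer_instance

-- ===== CLAIM (what is proved, stated in full; the proofs are below) =====
def Claim_equal_source_quality_tier_py : Prop := ∀ (domain : String), Dom_source_quality_tier_py domain → Spec_source_quality_tier_py domain (source_quality_tier_py domain)

-- ===== LEMMAS AND PROOFS =====

-- the tails of h that start right after a '.' (in left-to-right dot order)
def dotTails : List Char → List (List Char)
  | [] => []
  | c :: t => (if c = '.' then [t] else []) ++ dotTails t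

def firstHit : List (List Char) → String
  | [] => "Tier 3"
  | c :: cs => match altTable.get? c with | some t => t | none => firstHit cs

def wireK : List (List Char) := ["reuters.com".toList, "apnews.com".toList, "bloomberg.com".toList, "ft.com".toList, "wsj.com".toList]
def ngoK : List (List Char) := ["paho.org".toList, "who.int".toList, "reliefweb.int".toList, "worldbank.org".toList, "nrc.no".toList]
def majorK : List (List Char) := ["bbc.com".toList, "cnn.com".toList, "nytimes.com".toList, "wsj.com".toList, "ft.com".toList, "nbcnews.com".toList]
def localK : List (List Char) := ["elpitazo.net".toList, "efectococuyo.com".toList, "el-nacional.com".toList, "talcualdigital.com".toList, "venezuelanalysis.com".toList]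
def t1K : List (List Char) := wireK ++ ngoK ++ majorK
def allK : List (List Char) := t1K ++ localK

-- A's if-chain rephrased over candidate membership
def aChain (cs : List (List Char)) : String :=
  if wireK.any (fun d => cs.contains d) then "Tier 1"
  else if ngoK.any (fun d => cs.contains d) then "Tier 1"
  else if majorK.any (fun d => cs.contains d) then "Tier 1"
  else if localK.any (fun d => cs.contains d) then "Tier 2"
  else "Tier 3"

lemma mem_dotTails (d h : List Char) : d ∈ dotTails h ↔ ('.' :: d) <:+ h := by
  induction h with
  | nil => simp [dotTails]
  | cons c t ih =>
    by_cases hc : c = '.' <;>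
      simp [dotTails, hc, ih, List.suffix_cons_iff, eq_comm]

lemma dotTails_drop (h : List Char) :
    dotTails h = (match h.dropWhile (fun c => c ≠ '.') with
                  | [] => []
                  | _ :: r => r :: dotTails r) := by
  induction h with
  | nil => simp [dotTails]
  | cons c t ih =>
    by_cases hc : c = '.'
    · simp [dotTails, hc]
    · simpa [dotTails, hc, List.dropWhile_cons] using ih

lemma altLoop_eq (s : List Char) : altLoop s = firstHit (s :: dotTails s) := by
  have key : ∀ n, ∀ s : List Char, s.length ≤ n → altLoop s = firstHit (s :: dotTails s) := by
    intro n
    induction n with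
    | zero =>
      intro s hs
      have : s = [] := List.length_eq_zero_iff.mp (Nat.le_zero.mp hs)
      subst this
      rw [altLoop]
      rfl
    | succ n ih =>
      intro s hs
      rw [altLoop, firstHit]
      cases hg : altTable.get? s with
      | some t => simp
      | none =>
        simp only
        rw [dotTails_drop s]
        cases hr : s.dropWhile (fun c => c ≠ '.') with
        | nil => simp [firstHit]
        | cons c r =>
          have hlen : r.length ≤ n := by
            have h1 : (s.dropWhile (fun c => c ≠ '.')).length ≤ s.length :=
              List.length_dropWhile_le _ _
            rw [hr] at h1
            simp at h1
            omega
          simp [firstHit, ih r hlen]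
  exact key s.length s le_rfl

lemma tier1_val : ∀ c ∈ t1K, altTable.get? c = some "Tier 1" := by decide

lemma tier2_val : ∀ c ∈ localK, altTable.get? c = some "Tier 2" := by decide

lemma localDisjoint : ∀ x ∈ localK, x ∉ t1K := by decide

lemma get?_none (c : List Char) (hc : c ∉ allK) : altTable.get? c = none := by
  rw [PySem.Dict.get?_eq_none_iff_not_mem_keys]
  intro hmem
  apply hc
  simp only [altTable, PySem.Dict.keys_mk, List.map_cons, List.map_nil, List.mem_cons,
    List.not_mem_nil, or_false] at hmem
  rcases hmem with rfl | rfl | rfl | rfl | rfl | rfl | rfl | rfl | rfl | rfl | rfl | rfl | rfl | rfl | rfl | rfl | rfl | rfl | rfl <;> decide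

lemma noKeySuffix : ∀ k1 ∈ allK, ∀ k2 ∈ allK, ¬ (('.' :: k1) <:+ k2) := by decide

lemma cand_comp (h : List Char) :
    ∀ x ∈ h :: dotTails h, ∀ y ∈ h :: dotTails h,
      x = y ∨ ('.' :: x) <:+ y ∨ ('.' :: y) <:+ x := by
  have step : ∀ x y : List Char, ('.' :: x) <:+ ('.' :: y) → x = y ∨ ('.' :: x) <:+ y := by
    intro x y hxy
    rcases List.suffix_cons_iff.mp hxy with h | h
    · exact Or.inl (by injection h)
    · exact Or.inr h
  intro x hx y hy
  rcases List.mem_cons.mp hx with rfl | hx' <;> rcases List.mem_cons.mp hy with rfl | hy'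
  · exact Or.inl rfl
  · exact Or.inr (Or.inr ((mem_dotTails y x).mp hy'))
  · exact Or.inr (Or.inl ((mem_dotTails x y).mp hx'))
  · have hxs := (mem_dotTails x h).mp hx'
    have hys := (mem_dotTails y h).mp hy'
    rcases List.suffix_or_suffix_of_suffix hxs hys with hxy | hyx
    · rcases step x y hxy with h | h
      · exact Or.inl h
      · exact Or.inr (Or.inl h)
    · rcases step y x hyx with h | h
      · exact Or.inl h.symm
      · exact Or.inr (Or.inr h)

lemma any_contains_cons (g : List (List Char)) (c : List Char) (cs : List (List Char)) (hc : c ∉ g) :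
    g.any (fun d => (c :: cs).contains d) = g.any (fun d => cs.contains d) := by
  induction g with
  | nil => rfl
  | cons a g ih =>
    have ha : (a == c) = false := by
      simp only [beq_eq_false_iff_ne]
      exact fun h => hc (h ▸ List.mem_cons_self)
    rw [List.any_cons, List.any_cons, ih (fun h => hc (List.mem_cons_of_mem _ h))]
    have ha' : a ≠ c := fun h => hc (h ▸ List.mem_cons_self)
    simp [ha']

lemma main_chain (cs : List (List Char))
    (hcomp : ∀ x ∈ cs, ∀ y ∈ cs, x = y ∨ ('.' :: x) <:+ y ∨ ('.' :: y) <:+ x) :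
    aChain cs = firstHit cs := by
  induction cs with
  | nil => rfl
  | cons c cs ih =>
    rw [firstHit]
    cases hg : altTable.get? c with
    | none =>
      have hcK : c ∉ allK := by
        intro hmem
        rcases List.mem_append.mp hmem with h1 | h2
        · rw [tier1_val c h1] at hg; cases hg
        · rw [tier2_val c h2] at hg; cases hg
      have hw : c ∉ wireK := fun h =>
        hcK (List.mem_append_left _ (List.mem_append_left _ (List.mem_append_left _ h)))
      have hn : c ∉ ngoK := fun h =>
        hcK (List.mem_append_left _ (List.mem_append_left _ (List.mem_append_right _ h)))
      have hm : c ∉ majorK := fun h =>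
        hcK (List.mem_append_left _ (List.mem_append_right _ h))
      have hl : c ∉ localK := fun h => hcK (List.mem_append_right _ h)
      simp only
      rw [← ih (fun x hx y hy => hcomp x (List.mem_cons_of_mem _ hx) y (List.mem_cons_of_mem _ hy))]
      unfold aChain
      rw [any_contains_cons _ _ _ hw, any_contains_cons _ _ _ hn,
        any_contains_cons _ _ _ hm, any_contains_cons _ _ _ hl]
    | some t =>
      simp only
      have hcK : c ∈ allK := by
        by_contra h
        rw [get?_none c h] at hg
        cases hg
      have uniq : ∀ d, d ∈ allK → ((c :: cs).contains d = true) → d = c := by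
        intro d hd hcont
        have hdmem : d ∈ c :: cs := List.contains_iff_mem.mp hcont
        rcases hcomp d hdmem c List.mem_cons_self with h | h | h
        · exact h
        · exact absurd h (noKeySuffix d hd c hcK)
        · exact absurd h (noKeySuffix c hcK d hd)
      have hcc : (c :: cs).contains c = true := List.contains_iff_mem.mpr List.mem_cons_self
      rcases List.mem_append.mp hcK with h1 | h2
      · have ht : t = "Tier 1" := by
          rw [tier1_val c h1] at hg
          exact (Option.some_inj.mp hg).symm
        subst ht
        unfold aChain
        rcases List.mem_append.mp h1 with hwn | hm
        · rcases List.mem_append.mp hwn with hw | hn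
          · have hwa : wireK.any (fun d => (c :: cs).contains d) = true :=
              List.any_eq_true.mpr ⟨c, hw, hcc⟩
            rw [if_pos hwa]
          · have hna : ngoK.any (fun d => (c :: cs).contains d) = true :=
              List.any_eq_true.mpr ⟨c, hn, hcc⟩
            by_cases hwa : wireK.any (fun d => (c :: cs).contains d) = true
            · rw [if_pos hwa]
            · rw [if_neg hwa, if_pos hna]
        · have hma : majorK.any (fun d => (c :: cs).contains d) = true :=
            List.any_eq_true.mpr ⟨c, hm, hcc⟩
          by_cases hwa : wireK.any (fun d => (c :: cs).contains d) = true
          · rw [if_pos hwa]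
          · by_cases hna : ngoK.any (fun d => (c :: cs).contains d) = true
            · rw [if_neg hwa, if_pos hna]
            · rw [if_neg hwa, if_neg hna, if_pos hma]
      · have ht : t = "Tier 2" := by
          rw [tier2_val c h2] at hg
          exact (Option.some_inj.mp hg).symm
        subst ht
        unfold aChain
        have noT1 : ∀ g : List (List Char), (∀ x ∈ g, x ∈ t1K) →
            g.any (fun d => (c :: cs).contains d) = false := by
          intro g hsub
          rw [List.any_eq_false]
          intro d hd hcont
          have hdc : d = c := uniq d (List.mem_append_left _ (hsub d hd)) hcont
          exact localDisjoint c h2 (hdc ▸ hsub d hd)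
        have hwa := noT1 wireK (fun x hx =>
          List.mem_append_left _ (List.mem_append_left _ hx))
        have hna := noT1 ngoK (fun x hx =>
          List.mem_append_left _ (List.mem_append_right _ hx))
        have hma := noT1 majorK (fun x hx => List.mem_append_right _ hx)
        have hla : localK.any (fun d => (c :: cs).contains d) = true :=
          List.any_eq_true.mpr ⟨c, h2, hcc⟩
        rw [if_neg (ne_true_of_eq_false hwa), if_neg (ne_true_of_eq_false hna),
          if_neg (ne_true_of_eq_false hma), if_pos hla]

lemma test_eq (host d : String) :
    (host == d || PySem.Str.endswith host ("." ++ d))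
      = (host.toList :: dotTails host.toList).contains d.toList := by
  rw [Bool.eq_iff_iff]
  rw [List.contains_iff_mem]
  simp only [Bool.or_eq_true, beq_iff_eq, PySem.Str.endswith_eq, PySem.Chars.endswith_iff,
    String.toList_append, List.mem_cons, mem_dotTails]
  constructor
  · rintro (rfl | h)
    · exact Or.inl rfl
    · exact Or.inr (by simpa using h)
  · rintro (h | h)
    · exact Or.inl (String.toList_inj.mp h).symm
    · exact Or.inr (by simpa using h)

-- ===== VERDICT (by name: the statement is the Claim_ definition above) =====
theorem source_quality_tier_py_spec : Claim_equal_source_quality_tier_py := by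
  intro domain _
  unfold Spec_source_quality_tier_py source_quality_tier_py source_quality_tier_py_alt
  cases hh : PySem.Str.strip (PySem.Str.lower domain) == ""
  · simp only [hh, Bool.false_eq_true, if_false]
    rw [altLoop_eq, ← main_chain _ (cand_comp _)]
    simp only [aChain, wireK, ngoK, majorK, localK, List.any_cons, List.any_nil,
      Bool.or_false, test_eq]
  · simp [hh]
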